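-- pv_equiv track=rewrite | github.com/dlebed/secure-constants | secure_constants.py | visualize_bit_differences
-- ===== SOURCE A (Python) =====
-- def visualize_bit_differences(value1: int, value2: int, bit_width: int,
--                                label1: str = "A", label2: str = "B") -> str:
--     """
--     Generate ASCII visualization of bit difference positions.
--
--     Shows where bits differ between two values, grouped by bytes for readability.
--     Useful for identifying clustering patterns visually.
--
--     Args:
--         value1: First constant
--         value2: Second constant
--         bit_width: Bit width of constants
--         label1: Label for first value
--         label2: Label for second value
--
--     Returns:
--         Multi-line string with visualization
--     """
--     xor = value1 ^ value2
--     num_bytes = (bit_width + 7) // 8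
--
--     lines = []
--
--     # Hex values
--     hex_width = (bit_width + 3) // 4
--     lines.append(f"  {label1}: 0x{value1:0{hex_width}X}")
--     lines.append(f"  {label2}: 0x{value2:0{hex_width}X}")
--     lines.append(f"  XOR: 0x{xor:0{hex_width}X}")
--     lines.append("")
--
--     # Bit difference map (X = different, . = same)
--     lines.append("  Bit difference map (X = different, . = same):")
--     line = "  "
--
--     # Print bytes from high to low (left to right)
--     for byte_idx in range(num_bytes - 1, -1, -1):
--         for bit_idx in range(7, -1, -1):
--             pos = byte_idx * 8 + bit_idx
--             if pos < bit_width: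
--                 if (xor >> pos) & 1:
--                     line += "X"
--                 else:
--                     line += "."
--         line += " "
--
--     lines.append(line)
--
--     # Byte labels
--     byte_line = "  Byte: "
--     for byte_idx in range(num_bytes - 1, -1, -1):
--         byte_line += f"{byte_idx:^8} "
--     lines.append(byte_line)
--
--     return "\n".join(lines)
-- ===== SOURCE B (Python) =====
-- def visualize_bit_differences(value1: int, value2: int, bit_width: int,
--                                label1: str = "A", label2: str = "B") -> str:
--     xor = value1 ^ value2
--     num_bytes = (bit_width + 7) // 8
--     hex_width = (bit_width + 3) // 4
--
--     header = (f"  {label1}: 0x{value1:0{hex_width}X}\n"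
--               f"  {label2}: 0x{value2:0{hex_width}X}\n"
--               f"  XOR: 0x{xor:0{hex_width}X}\n\n"
--               "  Bit difference map (X = different, . = same):\n")
--
--     # bit map: binary string of the low bit_width bits, MSB first, translated
--     if bit_width > 0:
--         bits = format(xor & ((1 << bit_width) - 1), f'0{bit_width}b')
--         bits = bits.translate({ord('1'): 'X', ord('0'): '.'})
--         top = bit_width - (num_bytes - 1) * 8
--         groups = [bits[:top]] + [bits[top + 8 * k: top + 8 * k + 8]
--                                  for k in range(num_bytes - 1)]
--     else:
--         groups = []
--     map_line = "  " + "".join(g + " " for g in groups)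
--
--     byte_line = "  Byte: " + "".join(f"{i:^8} " for i in range(num_bytes - 1, -1, -1))
--
--     return header + map_line + "\n" + byte_line
-- ===== Notes on version B (the rewrite author's own statement) =====
-- stated objective: alternative
-- what changed: B replaces A's nested byte/bit shift-and-test loops by formatting the masked XOR once as a zero-padded binary string, translating '1'/'0' to 'X'/'.', and slicing it into one partial top group plus 8-char byte groups; header and byte-label lines are joined comprehensions instead of repeated appends.
import Mathlib
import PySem

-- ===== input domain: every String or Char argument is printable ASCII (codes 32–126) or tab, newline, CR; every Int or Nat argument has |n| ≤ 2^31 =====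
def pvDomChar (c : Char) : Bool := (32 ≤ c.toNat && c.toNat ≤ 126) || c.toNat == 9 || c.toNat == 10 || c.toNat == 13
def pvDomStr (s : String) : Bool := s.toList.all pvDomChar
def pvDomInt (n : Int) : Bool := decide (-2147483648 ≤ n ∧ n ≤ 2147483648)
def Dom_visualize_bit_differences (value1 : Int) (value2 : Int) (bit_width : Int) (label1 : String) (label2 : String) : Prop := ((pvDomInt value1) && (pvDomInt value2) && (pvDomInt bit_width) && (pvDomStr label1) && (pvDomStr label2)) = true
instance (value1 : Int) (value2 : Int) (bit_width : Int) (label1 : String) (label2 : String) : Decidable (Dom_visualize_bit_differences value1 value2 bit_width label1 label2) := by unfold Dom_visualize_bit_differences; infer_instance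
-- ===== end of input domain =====

-- B builds the bit map by binary-formatting the masked XOR once and slicing it into byte
-- groups, instead of A's nested byte/bit shift-and-test loops (objective: alternative).

-- ===== PORT A =====
-- shared f-string helpers (both Pythons contain the identical format expressions):
-- hand port of f"{v:0{w}X}" — exact for w ≥ 0 (Python raises on a negative width, excluded by Pre_)
def pvHexDigit (k : Nat) : Char := if k < 10 then Char.ofNat (48 + k) else Char.ofNat (55 + k)

def pvHexChars (m : Nat) : List Char :=
  if h : m < 16 then [pvHexDigit m] else pvHexChars (m / 16) ++ [pvHexDigit (m % 16)]
decreasing_by exact Nat.div_lt_self (by omega) (by omega)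

def pvFmtHex (v : Int) (w : Int) : List Char :=
  if v < 0 then PySem.Chars.zfill ('-' :: pvHexChars v.natAbs) w
  else PySem.Chars.zfill (pvHexChars v.toNat) w

-- hand port of f"{i:^8}" — Python '^' centering: extra space goes to the right
def pvFmtCenter8 (i : Int) : List Char :=
  let s := PySem.Int.toChars i
  if 8 ≤ s.length then s
  else List.replicate ((8 - s.length) / 2) ' ' ++ s ++
       List.replicate ((8 - s.length) - (8 - s.length) / 2) ' '

def visualize_bit_differences (value1 : Int) (value2 : Int) (bit_width : Int) (label1 : String) (label2 : String) : String :=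
  let xor := PySem.Int.bxor value1 value2
  let num_bytes := PySem.Int.floordiv (bit_width + 7) 8
  let hex_width := PySem.Int.floordiv (bit_width + 3) 4
  let lines : List (List Char) := [
    "  ".toList ++ label1.toList ++ ": 0x".toList ++ pvFmtHex value1 hex_width,
    "  ".toList ++ label2.toList ++ ": 0x".toList ++ pvFmtHex value2 hex_width,
    "  XOR: 0x".toList ++ pvFmtHex xor hex_width,
    [],
    "  Bit difference map (X = different, . = same):".toList]
  -- pos = byte_idx*8 + bit_idx is never negative in the loop, so pos.toNat is exact
  let line : List Char :=
    (PySem.List.pyRange (num_bytes - 1) (-1) (-1)).foldl (fun line byte_idx =>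
      ((PySem.List.pyRange 7 (-1) (-1)).foldl (fun line bit_idx =>
        let pos := byte_idx * 8 + bit_idx
        if pos < bit_width then
          if PySem.Int.band (xor >>> pos.toNat) 1 ≠ 0 then line ++ ['X'] else line ++ ['.']
        else line) line) ++ [' ']) "  ".toList
  let byte_line : List Char :=
    (PySem.List.pyRange (num_bytes - 1) (-1) (-1)).foldl (fun bl byte_idx =>
      bl ++ (pvFmtCenter8 byte_idx ++ [' '])) "  Byte: ".toList
  String.mk (PySem.Chars.join ['\n'] (lines ++ [line, byte_line]))

-- ===== PORT B =====
def visualize_bit_differences_alt (value1 : Int) (value2 : Int) (bit_width : Int) (label1 : String) (label2 : String) : String :=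
  let xor := PySem.Int.bxor value1 value2
  let num_bytes := PySem.Int.floordiv (bit_width + 7) 8
  let hex_width := PySem.Int.floordiv (bit_width + 3) 4
  let header : List Char :=
    "  ".toList ++ label1.toList ++ ": 0x".toList ++ pvFmtHex value1 hex_width ++
    "\n  ".toList ++ label2.toList ++ ": 0x".toList ++ pvFmtHex value2 hex_width ++
    "\n  XOR: 0x".toList ++ pvFmtHex xor hex_width ++
    "\n\n  Bit difference map (X = different, . = same):\n".toList
  -- format(m, f'0{bit_width}b') for m ≥ 0 is its binary digits zero-padded to bit_width
  let groups : List (List Char) :=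
    if 0 < bit_width then
      let bits := (PySem.Chars.zfill
          (PySem.Int.toBinChars (PySem.Int.band xor ((1 <<< bit_width.toNat) - 1)))
          bit_width).map (fun c => if c = '1' then 'X' else if c = '0' then '.' else c)
      let top := bit_width - (num_bytes - 1) * 8
      PySem.List.slice bits none (some top) ::
        (PySem.List.pyRange 0 (num_bytes - 1) 1).map (fun k =>
          PySem.List.slice bits (some (top + 8 * k)) (some (top + 8 * k + 8)))
    else []
  let map_line := "  ".toList ++ (groups.map (· ++ [' '])).flatten
  let byte_line := "  Byte: ".toList ++
    ((PySem.List.pyRange (num_bytes - 1) (-1) (-1)).map (fun i => pvFmtCenter8 i ++ [' '])).flatten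
  String.mk (header ++ map_line ++ ['\n'] ++ byte_line)

-- ===== PRECONDITION & SPEC =====
-- Pre_ excludes exactly bit_width ≤ -4, where hex_width < 0 makes A's f-string raise
-- "Invalid format specifier" (ValueError); B raises there too.
def Pre_visualize_bit_differences (value1 : Int) (value2 : Int) (bit_width : Int) (label1 : String) (label2 : String) : Prop := -3 ≤ bit_width
instance (value1 : Int) (value2 : Int) (bit_width : Int) (label1 : String) (label2 : String) : Decidable (Pre_visualize_bit_differences value1 value2 bit_width label1 label2) := by unfold Pre_visualize_bit_differences; infer_instance

def pvWitness_visualize_bit_differences : Int × Int × Int × String × String := (26, 44, 12, "A", "B")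

def Spec_visualize_bit_differences (value1 : Int) (value2 : Int) (bit_width : Int) (label1 : String) (label2 : String) (out : String) : Prop := out = visualize_bit_differences_alt value1 value2 bit_width label1 label2
instance (value1 : Int) (value2 : Int) (bit_width : Int) (label1 : String) (label2 : String) (out : String) : Decidable (Spec_visualize_bit_differences value1 value2 bit_width label1 label2 out) := by unfold Spec_visualize_bit_differences; infer_instance

-- ===== CLAIM (what is proved, stated in full; the proofs are below) =====
def Claim_equal_visualize_bit_differences : Prop := ∀ (value1 : Int) (value2 : Int) (bit_width : Int) (label1 : String) (label2 : String), Dom_visualize_bit_differences value1 value2 bit_width label1 label2 → Pre_visualize_bit_differences value1 value2 bit_width label1 label2 → Spec_visualize_bit_differences value1 value2 bit_width label1 label2 (visualize_bit_differences value1 value2 bit_width label1 label2)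

-- ===== LEMMAS AND PROOFS =====

-- the character A writes for bit position p of x
def pvBitChar (x : Int) (p : Nat) : Char :=
  if PySem.Int.band (x >>> p) 1 ≠ 0 then 'X' else '.'

-- recursion computing Nat.toDigits 2 in the natural "high digits ++ last digit" shape
def pvBinChars (m : Nat) : List Char :=
  if h : m < 2 then [Nat.digitChar m] else pvBinChars (m / 2) ++ [Nat.digitChar (m % 2)]
decreasing_by exact Nat.div_lt_self (by omega) (by omega)

def pvPadded (m w : Nat) : List Char :=
  List.replicate (w - (pvBinChars m).length) '0' ++ pvBinChars m

-- ---- toDigits bridge ----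
theorem pv_toDigitsCore_eq (f : Nat) : ∀ (m : Nat) (acc : List Char), m < f →
    Nat.toDigitsCore 2 f m acc = pvBinChars m ++ acc := by
  induction f with
  | zero => intro m acc h; omega
  | succ f ih =>
    intro m acc h
    rw [Nat.toDigitsCore]
    by_cases h2 : m < 2
    · have h0 : m / 2 = 0 := by omega
      have hm : m % 2 = m := by omega
      simp [pvBinChars, h0, hm, h2]
    · have hne : ¬ m / 2 = 0 := by omega
      simp only [if_neg hne]
      rw [ih (m / 2) _ (by omega)]
      conv_rhs => rw [pvBinChars]
      simp [h2, List.append_assoc]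

theorem pv_toDigits_two (m : Nat) : Nat.toDigits 2 m = pvBinChars m := by
  rw [Nat.toDigits]
  simpa using pv_toDigitsCore_eq (m + 1) m [] (by omega)

theorem pvBinChars_head (m : Nat) : ∃ k, k < 10 ∧ (pvBinChars m).head? = some (Nat.digitChar k) := by
  induction m using Nat.strong_induction_on with
  | _ m ih =>
    rw [pvBinChars]
    by_cases h : m < 2
    · exact ⟨m, by omega, by simp [h]⟩
    · obtain ⟨k, hk, hh⟩ := ih (m / 2) (Nat.div_lt_self (by omega) (by omega))
      refine ⟨k, hk, ?_⟩
      simp only [dif_neg h]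
      cases hb : pvBinChars (m / 2) with
      | nil => rw [hb] at hh; simp at hh
      | cons c cs => rw [hb] at hh; simpa using hh

theorem pv_zfill_eq (m w : Nat) :
    PySem.Chars.zfill (pvBinChars m) (w : Int) = pvPadded m w := by
  obtain ⟨k, hk, hh⟩ := pvBinChars_head m
  unfold PySem.Chars.zfill pvPadded
  by_cases hle : (w : Int) ≤ ((pvBinChars m).length : Int)
  · rw [if_pos hle]
    have : w - (pvBinChars m).length = 0 := by omega
    simp [this]
  · rw [if_neg hle]
    cases hb : pvBinChars m with
    | nil => simp [hb] at hh
    | cons c cs =>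
      rw [hb] at hh
      have hc : c = Nat.digitChar k := by simpa using hh
      have hnotsign : ¬ (c = '+' ∨ c = '-') := by
        subst hc
        interval_cases k <;> simp [Nat.digitChar] <;> decide
      show (if c = '+' ∨ c = '-' then _ else _) = _
      rw [if_neg hnotsign]
      have hw : (w : Int).toNat = w := by omega
      rw [hw]

-- binary digit at position p
def pvDigit (m p : Nat) : Char := if m / 2 ^ p % 2 = 1 then '1' else '0'

theorem pvPadded_step (m w : Nat) (hw : 1 ≤ w) :
    pvPadded m (w + 1) = pvPadded (m / 2) w ++ [Nat.digitChar (m % 2)] := by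
  by_cases h : m < 2
  · have h0 : m / 2 = 0 := by omega
    have hm : m % 2 = m := by omega
    rw [pvPadded, pvPadded, h0, hm]
    simp [pvBinChars, h]
    rw [show w = (w - 1) + 1 by omega, List.replicate_succ' (n := w - 1)]
    simp [Nat.digitChar]
  · rw [pvPadded, pvPadded]
    conv_lhs => rw [pvBinChars]
    simp only [dif_neg h]
    have : w + 1 - (pvBinChars (m / 2) ++ [Nat.digitChar (m % 2)]).length
        = w - (pvBinChars (m / 2)).length := by simp
    rw [this, List.append_assoc]

theorem pvPadded_eq (w : Nat) (hw : 1 ≤ w) : ∀ m, m < 2 ^ w →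
    pvPadded m w = ((List.range w).map (pvDigit m)).reverse := by
  induction w with
  | zero => omega
  | succ w ih =>
    intro m hm
    by_cases hw1 : w = 0
    · subst hw1
      have h2 : m < 2 := by simpa using hm
      have h0 : m / 2 = 0 := by omega
      rw [pvPadded, pvBinChars]
      simp only [dif_pos h2]
      simp [pvDigit, List.range_succ]
      rcases (by omega : m = 0 ∨ m = 1) with h | h <;> subst h <;> decide
    · have hw' : 1 ≤ w := by omega
      rw [pvPadded_step m w hw', ih hw' (m / 2) (by
        have : 2 ^ (w + 1) = 2 ^ w * 2 := by ring
        omega)]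
      rw [List.range_succ_eq_map]
      simp only [List.map_cons, List.map_map, List.reverse_cons]
      congr 1
      · apply congrArg
        apply List.map_congr_left
        intro p _
        simp only [Function.comp_apply, pvDigit]
        have : m / 2 ^ (p + 1) = m / 2 / 2 ^ p := by
          rw [pow_succ']
          rw [Nat.div_div_eq_div_mul]
        rw [this]
      · simp [pvDigit, pow_zero, Nat.div_one]
        rcases Nat.mod_two_eq_zero_or_one m with h | h <;> simp [h, Nat.digitChar]

-- ---- masking ----
theorem pv_band_mask (x : Int) (n : Nat) :
    PySem.Int.band x (((1 <<< n : Nat) : Int) - 1) = x % ((2:Int) ^ n) := by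
  have hsh : (1 <<< n : Nat) = 2 ^ n := Nat.one_shiftLeft n
  have hp1 : (1:Nat) ≤ 2 ^ n := Nat.one_le_two_pow
  have hmask : ((1 <<< n : Nat) : Int) - 1 = ((2 ^ n - 1 : Nat) : Int) := by
    rw [hsh, Nat.cast_sub hp1]; simp
  have h2 : ((2:Int) ^ n) = ((2 ^ n : Nat) : Int) := by push_cast; ring
  rw [hmask]
  unfold PySem.Int.band
  by_cases hx : 0 ≤ x
  · rw [if_pos hx, if_pos (by positivity)]
    rw [Int.toNat_natCast, Nat.and_two_pow_sub_one_eq_mod]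
    have hxx : x = ((x.toNat : Nat) : Int) := by omega
    rw [hxx, h2]
    exact_mod_cast rfl
  · rw [if_neg hx, if_pos (by positivity)]
    set k : Nat := (-x - 1).toNat with hk
    have hxk : x = -(k : Int) - 1 := by omega
    have htn : ((2 ^ n - 1 : Nat) : Int).toNat = 2 ^ n - 1 := by omega
    rw [htn]
    rw [Nat.land_comm, Nat.and_two_pow_sub_one_eq_mod]
    set P : Nat := 2 ^ n with hP
    set q : Nat := k / P with hq
    set r : Nat := k % P with hr
    have hklt : r < P := Nat.mod_lt _ (by positivity)
    have hdm : P * q + r = k := Nat.div_add_mod k P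
    have hstep : (x + ((2:Int) ^ n) * ((q : Int) + 1)) % ((2:Int) ^ n) = x % ((2:Int) ^ n) :=
      Int.add_mul_emod_self_left x ((2:Int) ^ n) ((q : Int) + 1)
    rw [← hstep, h2]
    have hval : x + ((P : Nat) : Int) * ((q : Int) + 1) = ((P - 1 - r : Nat) : Int) := by
      have hc : ((P - 1 - r : Nat) : Int) = (P : Int) - 1 - (r : Int) := by omega
      rw [hc, hxk]
      have h3 : ((P : Nat) : Int) * q + r = k := by exact_mod_cast hdm
      have hexp : ((P : Nat) : Int) * ((q : Int) + 1) = ((P : Nat) : Int) * q + P := by ring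
      rw [hexp]
      omega
    rw [hval, Int.emod_eq_of_lt (by positivity) (by exact_mod_cast (by omega : (P - 1 - r : Nat) < P))]

-- ---- bit condition bridge ----
theorem pv_cond_bridge (x : Int) (n p : Nat) (hp : p < n) :
    ((x % ((2:Int) ^ n)).toNat / 2 ^ p % 2 = 1) ↔ PySem.Int.band (x >>> p) 1 ≠ 0 := by
  have h2p : ((2:Int) ^ n) > 0 := by positivity
  have hMnn : 0 ≤ x % ((2:Int) ^ n) := Int.emod_nonneg x (by positivity)
  have hM : ((x % ((2:Int) ^ n)).toNat : Int) = x % ((2:Int) ^ n) := by omega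
  -- RHS normal form
  have hband : PySem.Int.band (x >>> p) 1 = (x / (2:Int) ^ p) % 2 := by
    rw [PySem.Int.band_one, PySem.Int.mod_eq_emod_of_pos (by norm_num),
        Int.shiftRight_eq_div_pow]
    norm_num
  -- LHS cast to Int
  have hcast : (((x % ((2:Int) ^ n)).toNat / 2 ^ p % 2 : Nat) : Int)
      = ((x % ((2:Int) ^ n)) / (2:Int) ^ p) % 2 := by
    push_cast
    rw [hM]
  -- core arithmetic
  have hcore : ((x % ((2:Int) ^ n)) / (2:Int) ^ p) % 2 = (x / (2:Int) ^ p) % 2 := by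
    set q : Int := x / 2 ^ n with hq
    have hdef : x % ((2:Int) ^ n) = x + (-((2:Int) ^ (n - p - 1) * q * 2)) * 2 ^ p := by
      rw [Int.emod_def]
      have hpow : (2:Int) ^ (n - p - 1) * 2 * 2 ^ p = 2 ^ n := by
        rw [← pow_succ, ← pow_add]
        congr 1
        omega
      have hthis : ((2:Int) ^ (n - p - 1) * q * 2) * 2 ^ p = 2 ^ n * q := by
        rw [← hpow]; ring
      rw [← hq]
      linarith [hthis]
    rw [hdef, Int.add_mul_ediv_right _ _ (by positivity : ((2:Int) ^ p) ≠ 0)]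
    omega
  constructor
  · intro h
    rw [hband]
    have : (((x % ((2:Int) ^ n)).toNat / 2 ^ p % 2 : Nat) : Int) = 1 := by exact_mod_cast h
    rw [hcast, hcore] at this
    omega
  · intro h
    rw [hband] at h
    have h1 : (x / (2:Int) ^ p) % 2 = 1 := by omega
    have : (((x % ((2:Int) ^ n)).toNat / 2 ^ p % 2 : Nat) : Int) = 1 := by
      rw [hcast, hcore]; exact h1
    exact_mod_cast this

-- ---- loop shapes ----
-- A's byte group: the characters the inner bit loop emits for byte b
def pvGroupA (x bw : Int) (b : Int) : List Char :=
  ((PySem.List.pyRange 7 (-1) (-1)).filter (fun bit => decide (b * 8 + bit < bw))).map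
    (fun bit => pvBitChar x (b * 8 + bit).toNat)

theorem pv_inner_eq (x bw b : Int) : ∀ (l : List Int) (acc : List Char),
    l.foldl (fun line bit_idx =>
      let pos := b * 8 + bit_idx
      if pos < bw then
        if PySem.Int.band (x >>> pos.toNat) 1 ≠ 0 then line ++ ['X'] else line ++ ['.']
      else line) acc
    = acc ++ ((l.filter (fun bit => decide (b * 8 + bit < bw))).map
        (fun bit => pvBitChar x (b * 8 + bit).toNat)) := by
  intro l
  induction l with
  | nil => simp
  | cons a l ih =>
    intro acc
    rw [List.foldl_cons]
    dsimp only
    by_cases hp : b * 8 + a < bw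
    · have hfc : List.filter (fun bit => decide (b * 8 + bit < bw)) (a :: l)
          = a :: List.filter (fun bit => decide (b * 8 + bit < bw)) l := by simp [hp]
      rw [if_pos hp]
      by_cases hq : PySem.Int.band (x >>> (b * 8 + a).toNat) 1 ≠ 0
      · rw [if_pos hq, ih, hfc, List.map_cons]
        simp only [pvBitChar, if_pos hq]
        simp
      · rw [if_neg hq, ih, hfc, List.map_cons]
        simp only [pvBitChar, if_neg hq]
        simp
    · have hfc : List.filter (fun bit => decide (b * 8 + bit < bw)) (a :: l)
          = List.filter (fun bit => decide (b * 8 + bit < bw)) l := by simp [hp]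
      rw [if_neg hp, ih, hfc]

theorem pv_outer_eq (x bw : Int) : ∀ (l : List Int) (acc : List Char),
    l.foldl (fun line byte_idx =>
      ((PySem.List.pyRange 7 (-1) (-1)).foldl (fun line bit_idx =>
        let pos := byte_idx * 8 + bit_idx
        if pos < bw then
          if PySem.Int.band (x >>> pos.toNat) 1 ≠ 0 then line ++ ['X'] else line ++ ['.']
        else line) line) ++ [' ']) acc
    = acc ++ (l.map (fun b => pvGroupA x bw b ++ [' '])).flatten := by
  intro l
  induction l with
  | nil => simp
  | cons a l ih =>
    intro acc
    simp only [List.foldl_cons, List.map_cons, List.flatten_cons]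
    rw [pv_inner_eq, ih, pvGroupA]
    simp [List.append_assoc]

-- ---- B's bit string ----
def pvBits (x : Int) (n : Nat) : List Char := (List.range n).map (pvBitChar x)

theorem pv_bits_eq (x bw : Int) (hbw : 0 < bw) :
    (PySem.Chars.zfill
        (PySem.Int.toBinChars (PySem.Int.band x ((1 <<< bw.toNat) - 1)))
        bw).map (fun c => if c = '1' then 'X' else if c = '0' then '.' else c)
      = (pvBits x bw.toNat).reverse := by
  set n := bw.toNat with hn
  have hbwn : bw = (n : Int) := by omega
  have hmod := pv_band_mask x n
  have hMnn : 0 ≤ x % ((2:Int) ^ n) := Int.emod_nonneg x (by positivity)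
  have hMlt : (x % ((2:Int) ^ n)).toNat < 2 ^ n := by
    have := Int.emod_lt_of_pos x (b := (2:Int) ^ n) (by positivity)
    have h2 : ((2:Int) ^ n) = ((2 ^ n : Nat) : Int) := by push_cast; ring
    omega
  rw [hmod]
  have htb : PySem.Int.toBinChars (x % ((2:Int) ^ n)) = pvBinChars (x % ((2:Int) ^ n)).toNat := by
    unfold PySem.Int.toBinChars
    rw [if_neg (by omega), pv_toDigits_two]
  rw [htb, hbwn, pv_zfill_eq, pvPadded_eq n (by omega) _ hMlt, List.map_reverse]
  congr 1
  rw [List.map_map]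
  apply List.map_congr_left
  intro p hp
  have hpn : p < n := List.mem_range.mp hp
  simp only [Function.comp_apply, pvDigit, pvBitChar]
  by_cases hc : (x % ((2:Int) ^ n)).toNat / 2 ^ p % 2 = 1
  · rw [if_pos hc]
    rw [if_pos ((pv_cond_bridge x n p hpn).mp hc)]
    simp
  · rw [if_neg hc]
    rw [if_neg (fun hb => hc ((pv_cond_bridge x n p hpn).mpr hb))]
    simp

-- ---- reversed-range slicing ----
theorem pv_take_rev (n t : Nat) (f : Nat → Char) (h : t ≤ n) :
    List.take t (((List.range n).map f).reverse) = ((List.range' (n - t) t).map f).reverse := by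
  rw [List.take_reverse]
  congr 1
  rw [List.length_map, List.length_range, ← List.map_drop]
  congr 1
  rw [List.range_eq_range', List.drop_range']
  congr 1 <;> omega

theorem pv_drop_rev (n d : Nat) (f : Nat → Char) (h : d ≤ n) :
    List.drop d (((List.range n).map f).reverse) = ((List.range (n - d)).map f).reverse := by
  rw [List.drop_reverse]
  congr 1
  rw [List.length_map, List.length_range, ← List.map_take, List.take_range,
    min_eq_left (by omega : n - d ≤ n)]

-- ---- byte-group characterisation ----
theorem pv_grpA_eq (x bw : Int) (b t : Nat) (h1 : 1 ≤ t) (h8 : t ≤ 8)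
    (hcond : ∀ bit : Int, 0 ≤ bit → bit < 8 → (((b : Int)) * 8 + bit < bw ↔ bit < (t : Int))) :
    pvGroupA x bw (b : Int) = ((List.range' (8 * b) t).map (pvBitChar x)).reverse := by
  have hlit : PySem.List.pyRange 7 (-1) (-1) = [7, 6, 5, 4, 3, 2, 1, 0] := by decide
  unfold pvGroupA
  rw [hlit]
  have hf : ∀ bit ∈ [(7:Int), 6, 5, 4, 3, 2, 1, 0],
      decide ((b : Int) * 8 + bit < bw) = decide (bit < (t : Int)) := by
    intro bit hbit
    rw [decide_eq_decide]
    apply hcond <;> (simp at hbit; omega)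
  rw [List.filter_congr hf]
  have he : ∀ k : Nat, pvBitChar x ((b : Int) * 8 + (k : Int)).toNat = pvBitChar x (8 * b + k) := by
    intro k
    exact congrArg (pvBitChar x) (by omega)
  interval_cases t <;>
    simp [List.range', List.filter] <;>
    norm_num <;>
    first
      | rfl
      | (and_intros <;> exact congrArg (pvBitChar x) (by omega))

-- ===== generic loop shapes =====
theorem pv_foldl_flatten {g : Int → List Char} :
    ∀ (l : List Int) (acc : List Char),
    l.foldl (fun acc i => acc ++ g i) acc = acc ++ (l.map g).flatten := by
  intro l
  induction l with
  | nil => simp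
  | cons a l ih => intro acc; simp [ih, List.append_assoc]


-- ---- the heart: A's byte groups coincide with B's slices of the bit string ----
theorem pv_groups_eq (x bw : Int) (hpre : -3 ≤ bw) :
    List.map (pvGroupA x bw) (PySem.List.pyRange (PySem.Int.floordiv (bw + 7) 8 - 1) (-1) (-1))
    = (if 0 < bw then
        PySem.List.slice
            (List.map (fun c => if c = '1' then 'X' else if c = '0' then '.' else c)
              (PySem.Chars.zfill
                (PySem.Int.toBinChars (PySem.Int.band x (((1 <<< bw.toNat : Nat) : Int) - 1))) bw))
            none (some (bw - (PySem.Int.floordiv (bw + 7) 8 - 1) * 8)) ::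
          List.map
            (fun k =>
              PySem.List.slice
                (List.map (fun c => if c = '1' then 'X' else if c = '0' then '.' else c)
                  (PySem.Chars.zfill
                    (PySem.Int.toBinChars (PySem.Int.band x (((1 <<< bw.toNat : Nat) : Int) - 1))) bw))
                (some (bw - (PySem.Int.floordiv (bw + 7) 8 - 1) * 8 + 8 * k))
                (some (bw - (PySem.Int.floordiv (bw + 7) 8 - 1) * 8 + 8 * k + 8)))
            (PySem.List.pyRange 0 (PySem.Int.floordiv (bw + 7) 8 - 1))
      else []) := by
  by_cases hbw : 0 < bw
  · rw [if_pos hbw]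
    set n : Nat := bw.toNat with hndef
    have hbwn : bw = (n : Int) := by omega
    set nbN : Nat := (n + 7) / 8 with hnbdef
    have hnb : PySem.Int.floordiv (bw + 7) 8 = (nbN : Int) := by
      rw [show bw + 7 = ((n + 7 : Nat) : Int) by omega,
        show (8 : Int) = ((8 : Nat) : Int) by norm_num, PySem.Int.floordiv_natCast]
    set topN : Nat := n - 8 * (nbN - 1) with htopdef
    have hfacts : 1 ≤ nbN ∧ 1 ≤ topN ∧ topN ≤ 8 ∧ n = 8 * (nbN - 1) + topN := by omega
    obtain ⟨hnb1, ht1, ht8, hsum⟩ := hfacts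
    rw [pv_bits_eq x bw hbw, hnb]
    rw [show pvBits x bw.toNat = (List.range n).map (pvBitChar x) from rfl]
    have hlen : (pvBits x n).length = n := by simp [pvBits]
    have htop : bw - ((nbN : Int) - 1) * 8 = ((topN : Nat) : Int) := by push_cast; omega
    rw [htop]
    obtain ⟨m, hm⟩ : ∃ m, nbN = m + 1 := ⟨nbN - 1, by omega⟩
    -- the byte index list, high to low
    rw [PySem.List.pyRange_neg_one]
    rw [show (((nbN : Int) - 1) - (-1)).toNat = m + 1 by omega]
    rw [List.range_succ_eq_map, List.map_cons, List.map_cons, List.map_map, List.map_map]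
    congr 1
    · -- top byte
      rw [PySem.List.slice_to _ (by omega : (0:Int) ≤ ((topN : Nat) : Int)), Int.toNat_natCast]
      rw [pv_take_rev n topN _ (by omega), show n - topN = 8 * m by omega]
      rw [show ((nbN : Int) - 1 - ((0 : Nat) : Int)) = ((m : Nat) : Int) by omega]
      rw [pv_grpA_eq x bw m topN ht1 ht8 (by
        intro bit hb0 hb8
        rw [hbwn]
        push_cast
        omega)]
    · -- full bytes below the top one
      rw [PySem.List.pyRange_one]
      rw [show (((nbN : Int) - 1) - 0) = ((m : Nat) : Int) by omega, Int.toNat_natCast,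
        List.map_map]
      apply List.map_congr_left
      intro k hk
      have hkm : k < m := List.mem_range.mp hk
      simp only [Function.comp_apply, Nat.succ_eq_add_one]
      rw [show ((0 : Int) + (k : Int)) = ((k : Nat) : Int) by omega]
      rw [PySem.List.slice_toNat _ (by omega) (by omega)]
      rw [show (((topN : Nat) : Int) + 8 * ((k : Nat) : Int) + 8).toNat = (topN + 8 * k) + 8 by omega,
        show (((topN : Nat) : Int) + 8 * ((k : Nat) : Int)).toNat = topN + 8 * k by omega,
        show (topN + 8 * k) + 8 - (topN + 8 * k) = 8 by omega]
      rw [pv_drop_rev n (topN + 8 * k) _ (by omega)]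
      rw [pv_take_rev (n - (topN + 8 * k)) 8 _ (by omega),
        show n - (topN + 8 * k) - 8 = 8 * (m - 1 - k) by omega]
      rw [show ((nbN : Int) - 1 - (((k + 1 : Nat)) : Int)) = ((m - 1 - k : Nat) : Int) by push_cast; omega]
      rw [pv_grpA_eq x bw (m - 1 - k) 8 (by omega) (by omega) (by
        intro bit hb0 hb8
        rw [hbwn]
        push_cast
        constructor
        · intro _; omega
        · intro _; omega)]
  · rw [if_neg hbw]
    have hnb0 : PySem.Int.floordiv (bw + 7) 8 = 0 := by
      rw [PySem.Int.floordiv_eq_iff_of_pos (by norm_num)]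
      omega
    rw [hnb0]
    norm_num

-- ===== VERDICT (by name: the statement is the Claim_ definition above) =====
theorem visualize_bit_differences_spec : Claim_equal_visualize_bit_differences := by
  intro v1 v2 bw l1 l2 hdom hpre
  have hpre' : -3 ≤ bw := hpre
  unfold Spec_visualize_bit_differences visualize_bit_differences visualize_bit_differences_alt
  dsimp only
  refine congrArg String.mk ?_
  rw [pv_outer_eq, pv_foldl_flatten]
  simp only [PySem.Chars.join, List.intercalate, List.cons_append, List.nil_append,
    List.intersperse, List.flatten_cons, List.flatten_nil, List.append_nil]
  rw [show (fun b => pvGroupA (PySem.Int.bxor v1 v2) bw b ++ [' '])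
      = ((fun g => g ++ [' ']) ∘ pvGroupA (PySem.Int.bxor v1 v2) bw) from rfl,
    ← List.map_map, pv_groups_eq (PySem.Int.bxor v1 v2) bw hpre']
  simp [List.append_assoc]
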